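-- pv_equiv track=rewrite | github.com/kubleralice-ux/Machine_learning | Pretraitement_des_donnees/lecture_csv.py | new_name_added
-- ===== SOURCE A (Python) =====
-- def new_name_added(data):
--     data = sorted(data, key=lambda x: (x[1], x[2]))
--     numero = 0
--     ancien_filename = None
--     for ligne in data:
--         file_name = ligne[1]
--         if file_name == ancien_filename:
--             numero += 1
--         else:
--             numero = 1
--         base = file_name.replace(".wav", "")
--         newfile_name = f"{base}_{numero}.wav"
--         ligne.append(newfile_name)
--         ancien_filename = file_name
--     return data
-- ===== SOURCE B (Python) =====
-- def new_name_added(data):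
--     # Stateless occurrence-rank numbering: after the same sort, each row's
--     # number is computed independently as 1 + how many earlier sorted rows
--     # carry the same filename (no running counter / previous-filename state).
--     # Mutates the rows in place (appends the new name), like the original.
--     data = sorted(data, key=lambda x: (x[1], x[2]))
--     names = [row[1] for row in data]
--     for p, row in enumerate(data):
--         numero = names[:p].count(row[1]) + 1
--         row.append(f"{row[1].replace('.wav', '')}_{numero}.wav")
--     return data
-- ===== Notes on version B (the rewrite author's own statement) =====
-- stated objective: alternative
-- what changed: Replaces A's stateful pass (ancien_filename sentinel + running numero counter) by stateless occurrence-rank numbering: after the same sort, a names list is built once and each row's number is computed independently as 1 + the count of its filename among the earlier sorted rows.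
import Mathlib
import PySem

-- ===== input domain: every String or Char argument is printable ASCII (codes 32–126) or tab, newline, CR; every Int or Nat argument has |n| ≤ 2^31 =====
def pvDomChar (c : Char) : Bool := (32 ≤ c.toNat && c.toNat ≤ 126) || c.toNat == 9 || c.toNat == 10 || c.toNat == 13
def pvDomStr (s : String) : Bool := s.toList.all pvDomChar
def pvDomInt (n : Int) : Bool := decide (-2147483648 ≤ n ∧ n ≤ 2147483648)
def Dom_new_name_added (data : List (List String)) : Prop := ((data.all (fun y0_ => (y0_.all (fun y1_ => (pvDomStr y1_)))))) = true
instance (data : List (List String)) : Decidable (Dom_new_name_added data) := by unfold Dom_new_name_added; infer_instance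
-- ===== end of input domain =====

-- B replaces A's stateful pass (ancien_filename sentinel + numero counter) by stateless
-- occurrence-rank numbering over a names list built once; same sort, same return value.
-- Both Pythons mutate the rows in place identically; the equivalence is about the return value.

-- ===== PORT A =====
-- ligne[1] / ligne[2]; total via getD, in range on Pre_ (rows have length ≥ 3)
def nnKey1 (x : List String) : String := (PySem.List.pyGet? x 1).getD ""
def nnKey2 (x : List String) : String := (PySem.List.pyGet? x 2).getD ""
-- f"{file_name.replace('.wav','')}_{numero}.wav"
def nnName (fn : String) (n : Int) : String :=
  PySem.Str.replace fn ".wav" "" ++ "_" ++ PySem.Int.toStr n ++ ".wav"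

-- A's for-loop, state = (numero, ancien_filename)
def nnLoopA : List (List String) → Int → Option String → List (List String)
  | [], _, _ => []
  | ligne :: rest, numero, ancien =>
      let fn := nnKey1 ligne
      let n : Int := if ancien = some fn then numero + 1 else 1
      (ligne ++ [nnName fn n]) :: nnLoopA rest n (some fn)

def new_name_added (data : List (List String)) : List (List String) :=
  nnLoopA (PySem.List.sorted2 data nnKey1 nnKey2) 0 none

-- ===== PORT B =====
-- names = [row[1] for row in data]; numero = names[:p].count(row[1]) + 1
def new_name_added_alt (data : List (List String)) : List (List String) :=
  let s := PySem.List.sorted2 data nnKey1 nnKey2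
  let names := s.map nnKey1
  (PySem.List.enumerate s 0).map (fun p =>
    p.2 ++ [nnName (nnKey1 p.2)
      (((PySem.List.slice names none (some p.1)).count (nnKey1 p.2) : Int) + 1)])

-- ===== PRECONDITION & SPEC =====
-- Pre_ excludes exactly the inputs where Python A raises IndexError: a row with
-- fewer than 3 entries makes the sort key x[1] or x[2] fail.
def Pre_new_name_added (data : List (List String)) : Prop :=
  ∀ r ∈ data, 3 ≤ r.length
instance (data : List (List String)) : Decidable (Pre_new_name_added data) := by
  unfold Pre_new_name_added; infer_instance

def pvWitness_new_name_added : List (List String) :=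
  [["a", "x.wav", "2"], ["b", "y.wav", "1"], ["c", "x.wav", "1"]]

def Spec_new_name_added (data : List (List String)) (out : List (List String)) : Prop := out = new_name_added_alt data
instance (data : List (List String)) (out : List (List String)) : Decidable (Spec_new_name_added data out) := by unfold Spec_new_name_added; infer_instance

-- ===== CLAIM (what is proved, stated in full; the proofs are below) =====
def Claim_equal_new_name_added : Prop := ∀ (data : List (List String)), Dom_new_name_added data → Pre_new_name_added data → Spec_new_name_added data (new_name_added data)

-- ===== LEMMAS AND PROOFS =====

-- B's numbering, recast as a structural recursion carrying the keys already seen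
def nnCountLoop : List String → List (List String) → List (List String)
  | _, [] => []
  | acc, r :: rest =>
      (r ++ [nnName (nnKey1 r) ((acc.count (nnKey1 r) : Int) + 1)]) ::
        nnCountLoop (acc ++ [nnKey1 r]) rest

-- the enumerate/slice form of B equals the seen-keys recursion
lemma nnB_eq_countLoop (l : List (List String)) (pre : List String) :
    (PySem.List.enumerate l (pre.length : Int)).map (fun p =>
      p.2 ++ [nnName (nnKey1 p.2)
        (((PySem.List.slice (pre ++ l.map nnKey1) none (some p.1)).count (nnKey1 p.2) : Int) + 1)])
    = nnCountLoop pre l := by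
  induction l generalizing pre with
  | nil => simp [nnCountLoop, PySem.List.enumerate_nil]
  | cons r rest ih =>
      rw [PySem.List.enumerate_cons, List.map_cons, nnCountLoop]
      refine congrArg₂ List.cons ?_ ?_
      · show r ++ [nnName (nnKey1 r) _] = _
        rw [PySem.List.slice_to_natCast, List.take_left]
      · have h1 : pre ++ (r :: rest).map nnKey1 = (pre ++ [nnKey1 r]) ++ rest.map nnKey1 := by
          simp
        have h2 : (pre.length : Int) + 1 = ((pre ++ [nnKey1 r]).length : Int) := by
          simp
        rw [h1, h2, ih (pre ++ [nnKey1 r])]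

-- sorted2's comparison orders the first key weakly: its output is Pairwise (key1 ≤ key1)
lemma nnInsertBy_pairwise (x : List String) (ys : List (List String))
    (h : ys.Pairwise (fun a b => nnKey1 a ≤ nnKey1 b)) :
    (PySem.List.insertBy
        (fun a b => decide (nnKey1 a < nnKey1 b) ||
          (!decide (nnKey1 b < nnKey1 a) && decide (nnKey2 a < nnKey2 b))) x ys).Pairwise
      (fun a b => nnKey1 a ≤ nnKey1 b) := by
  induction ys with
  | nil => simp [PySem.List.insertBy]
  | cons y ys ih =>
      rw [PySem.List.insertBy]
      split_ifs with hb
      · refine List.Pairwise.cons ?_ h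
        intro z hz
        have hxy : nnKey1 x ≤ nnKey1 y := by
          rcases Bool.or_eq_true_iff.mp hb with h1 | h2
          · exact le_of_lt (of_decide_eq_true h1)
          · have := (Bool.and_eq_true_iff.mp h2).1
            simp only [Bool.not_eq_eq_eq_not, Bool.not_true, decide_eq_false_iff_not] at this
            exact not_lt.mp this
        rcases List.mem_cons.mp hz with rfl | hz'
        · exact hxy
        · exact le_trans hxy (List.rel_of_pairwise_cons h hz')
      · refine List.Pairwise.cons ?_ (ih h.tail)
        intro z hz
        have hyx : nnKey1 y ≤ nnKey1 x := by
          simp only [Bool.or_eq_true_iff, Bool.and_eq_true_iff, decide_eq_true_eq,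
            Bool.not_eq_eq_eq_not, Bool.not_true, decide_eq_false_iff_not, not_or, not_and] at hb
          exact not_lt.mp hb.1
        rcases (PySem.List.mem_insertBy _ _ _ _).mp hz with rfl | hz'
        · exact hyx
        · exact List.rel_of_pairwise_cons h hz'

lemma nnSorted2_pairwise (xs : List (List String)) :
    (PySem.List.sorted2 xs nnKey1 nnKey2).Pairwise (fun a b => nnKey1 a ≤ nnKey1 b) := by
  have key : ∀ (ys : List (List String)) (acc : List (List String)),
      acc.Pairwise (fun a b => nnKey1 a ≤ nnKey1 b) →
      (ys.foldl (fun acc x => PySem.List.insertBy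
        (fun a b => decide (nnKey1 a < nnKey1 b) ||
          (!decide (nnKey1 b < nnKey1 a) && decide (nnKey2 a < nnKey2 b))) x acc) acc).Pairwise
        (fun a b => nnKey1 a ≤ nnKey1 b) := by
    intro ys
    induction ys with
    | nil => intro acc h; simpa using h
    | cons x ys ih =>
        intro acc h
        exact ih _ (nnInsertBy_pairwise x acc h)
  exact key xs [] (by simp)

-- A's counter loop equals B's seen-keys counting, under the sortedness invariant
lemma nnLoops_eq (l : List (List String))
    (hl : l.Pairwise (fun a b => nnKey1 a ≤ nnKey1 b))
    (acc : List String) (n : Int) (anc : Option String)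
    (h1 : ∀ k, anc = some k → (acc.count k : Int) = n)
    (h2 : ∀ y ∈ l, anc ≠ some (nnKey1 y) → acc.count (nnKey1 y) = 0)
    (h3 : ∀ k, anc = some k → ∀ y ∈ l, k ≤ nnKey1 y) :
    nnLoopA l n anc = nnCountLoop acc l := by
  induction l generalizing acc n anc with
  | nil => simp [nnLoopA, nnCountLoop]
  | cons r rest ih =>
      have hcnt : ((acc ++ [nnKey1 r]).count (nnKey1 r) : Int) = (acc.count (nnKey1 r) : Int) + 1 := by
        rw [List.count_append]; push_cast; simp
      have h2r : ∀ y ∈ rest, some (nnKey1 r) ≠ some (nnKey1 y) →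
          (acc ++ [nnKey1 r]).count (nnKey1 y) = 0 := by
        intro y hy hne
        have hyk : nnKey1 y ≠ nnKey1 r := fun hc => hne (by rw [hc])
        rw [List.count_append, List.count_singleton, if_neg (by simpa using hyk.symm)]
        have hanc : anc ≠ some (nnKey1 y) := by
          intro hc
          have hle : nnKey1 y ≤ nnKey1 r := h3 _ hc r (by simp)
          have hge : nnKey1 r ≤ nnKey1 y := List.rel_of_pairwise_cons hl hy
          exact hyk (le_antisymm hle hge)
        simpa using h2 y (List.mem_cons_of_mem _ hy) hanc
      have h3r : ∀ k, some (nnKey1 r) = some k → ∀ y ∈ rest, k ≤ nnKey1 y := by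
        intro k hkk y hy
        injection hkk with hkk; subst hkk
        exact List.rel_of_pairwise_cons hl hy
      simp only [nnLoopA, nnCountLoop]
      by_cases ha : anc = some (nnKey1 r)
      · rw [if_pos ha]
        have hc : (acc.count (nnKey1 r) : Int) = n := h1 _ ha
        refine congrArg₂ List.cons (by rw [← hc]) ?_
        refine ih hl.tail (acc ++ [nnKey1 r]) (n + 1) (some (nnKey1 r)) ?_ h2r h3r
        intro k hkk
        injection hkk with hkk; subst hkk
        rw [hcnt, hc]
      · rw [if_neg ha]
        have hc0 : acc.count (nnKey1 r) = 0 := h2 r (by simp) (by simpa using ha)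
        refine congrArg₂ List.cons (by rw [hc0]; norm_num) ?_
        refine ih hl.tail (acc ++ [nnKey1 r]) 1 (some (nnKey1 r)) ?_ h2r h3r
        intro k hkk
        injection hkk with hkk; subst hkk
        rw [hcnt, hc0]
        norm_num

-- ===== VERDICT (by name: the statement is the Claim_ definition above) =====
theorem new_name_added_spec : Claim_equal_new_name_added := by
  intro data _ _
  unfold Spec_new_name_added new_name_added new_name_added_alt
  have hb := nnB_eq_countLoop (PySem.List.sorted2 data nnKey1 nnKey2) []
  simp only [List.nil_append, List.length_nil, Nat.cast_zero] at hb
  rw [hb]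
  exact nnLoops_eq _ (nnSorted2_pairwise data) [] 0 none
    (by intro k h; cases h) (by simp) (by intro k h; cases h)
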